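-- pv_equiv track=rewrite | github.com/Future-Gamer/Hackthon | Day-12(Part-2).py | find_number_of_sides_this_list
-- ===== SOURCE A (Python) =====
-- def find_number_of_sides_this_list(col_list):
--     col_list.sort()
--     new_list = []
--
--     while col_list:
--         candidate = col_list.pop(0)
--         previous = new_list[-1] if new_list else None
--
--         if previous is None:
--             new_list.append(candidate)
--         elif candidate - previous == 1:
--             new_list.pop()
--
--         new_list.append(candidate)
--
--     return len(new_list)
-- ===== SOURCE B (Python) =====
-- def find_number_of_sides_this_list(col_list):
--     col_list.sort()
--     if not col_list:
--         return 0
--     count = sum(1 for a, b in zip(col_list, col_list[1:]) if b - a == 1)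
--     return len(col_list) + 1 - count
-- ===== Notes on version B (the rewrite author's own statement) =====
-- stated objective: simpler
-- what changed: Replaces the pop/append stack simulation of the while-loop (quadratic due to pop(0)) with a closed-form arithmetic count of adjacent sorted pairs differing by exactly 1 (len+1-count); note A also empties col_list via pop(0) while B only sorts it, so the equivalence is about the return value.
import Mathlib
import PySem

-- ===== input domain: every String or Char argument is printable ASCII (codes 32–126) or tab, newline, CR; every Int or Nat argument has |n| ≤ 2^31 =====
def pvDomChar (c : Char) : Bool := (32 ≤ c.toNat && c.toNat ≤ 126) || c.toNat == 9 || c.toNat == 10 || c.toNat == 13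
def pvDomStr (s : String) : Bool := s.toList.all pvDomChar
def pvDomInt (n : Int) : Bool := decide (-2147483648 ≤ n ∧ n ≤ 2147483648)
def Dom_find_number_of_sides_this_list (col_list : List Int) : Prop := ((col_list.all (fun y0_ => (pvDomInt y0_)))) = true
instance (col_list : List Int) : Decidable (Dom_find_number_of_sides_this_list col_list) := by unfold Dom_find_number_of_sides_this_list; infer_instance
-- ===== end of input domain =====

-- B replaces the while-loop pop/append stack simulation by a closed form: len+1 - (number of
-- adjacent sorted pairs differing by exactly 1). A also empties col_list in place (pop(0)) while
-- B only sorts it; the equivalence proved here is about the RETURN value only.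

-- ===== PORT A =====
-- the while-loop: remaining col_list, accumulator new_list
def pvLoopA : List Int → List Int → List Int
  | [], new_list => new_list
  | c :: rest, new_list =>
    match new_list.getLast? with
    | none => pvLoopA rest ((new_list ++ [c]) ++ [c])        -- previous is None: append, then append
    | some p =>
      if c - p = 1 then pvLoopA rest (new_list.dropLast ++ [c])   -- pop, then append
      else pvLoopA rest (new_list ++ [c])                          -- just the final append

def find_number_of_sides_this_list (col_list : List Int) : Int :=
  ((pvLoopA (PySem.List.sorted col_list (fun x => x)) []).length : Int)

-- ===== PORT B =====
def find_number_of_sides_this_list_alt (col_list : List Int) : Int :=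
  let s := PySem.List.sorted col_list (fun x => x)
  if s = [] then 0
  else
    let count : Int := (((s.zip (s.drop 1)).filter (fun p => decide (p.2 - p.1 = 1))).length : Int)
    (s.length : Int) + 1 - count

-- ===== PRECONDITION & SPEC =====
def Spec_find_number_of_sides_this_list (col_list : List Int) (out : Int) : Prop := out = find_number_of_sides_this_list_alt col_list
instance (col_list : List Int) (out : Int) : Decidable (Spec_find_number_of_sides_this_list col_list out) := by unfold Spec_find_number_of_sides_this_list; infer_instance

-- ===== CLAIM (what is proved, stated in full; the proofs are below) =====
def Claim_equal_find_number_of_sides_this_list : Prop := ∀ (col_list : List Int), Dom_find_number_of_sides_this_list col_list → Spec_find_number_of_sides_this_list col_list (find_number_of_sides_this_list col_list)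

-- ===== LEMMAS AND PROOFS =====

-- g c rest = number of adjacent pairs in (c :: rest) whose difference is NOT 1
def pvG : Int → List Int → Nat
  | _, [] => 0
  | c, d :: rest => (if d - c = 1 then 0 else 1) + pvG d rest

theorem pvLoopA_len : ∀ (rest : List Int) (c : Int) (acc : List Int),
    (pvLoopA rest (acc ++ [c])).length = acc.length + 1 + pvG c rest := by
  intro rest
  induction rest with
  | nil => intro c acc; simp [pvLoopA, pvG]
  | cons d rest ih =>
    intro c acc
    have hlast : (acc ++ [c]).getLast? = some c := by simp
    by_cases h : d - c = 1
    · simp [pvLoopA, hlast, h, pvG, ih]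
    · have : (acc ++ [c]) ++ [d] = (acc ++ [c]) ++ [d] := rfl
      simp only [pvLoopA, hlast, if_neg h]
      rw [ih d (acc ++ [c])]
      simp [pvG, h]
      omega

theorem pvG_count : ∀ (rest : List Int) (c : Int),
    pvG c rest + ((( c :: rest).zip rest).filter (fun p => decide (p.2 - p.1 = 1))).length = rest.length := by
  intro rest
  induction rest with
  | nil => intro c; simp [pvG]
  | cons d r ih =>
    intro c
    have := ih d
    rw [List.zip_cons_cons]
    by_cases h : d - c = 1 <;> simp [pvG, h, List.filter] <;> omega

-- ===== VERDICT (by name: the statement is the Claim_ definition above) =====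
theorem find_number_of_sides_this_list_spec : Claim_equal_find_number_of_sides_this_list := by
  intro col_list _
  unfold Spec_find_number_of_sides_this_list find_number_of_sides_this_list find_number_of_sides_this_list_alt
  cases hs : PySem.List.sorted col_list (fun x => x) with
  | nil => simp [pvLoopA]
  | cons c rest =>
    have h1 : pvLoopA (c :: rest) [] = pvLoopA rest ([c] ++ [c]) := by
      simp [pvLoopA]
    have h2 : (pvLoopA rest ([c] ++ [c])).length = 1 + 1 + pvG c rest :=
      pvLoopA_len rest c [c]
    have h3 := pvG_count rest c
    simp only [h1, h2, List.drop_one, List.tail_cons]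
    have hzip : (c :: rest).zip rest = ((c :: rest).zip rest) := rfl
    simp only [List.length_cons]
    push_cast
    omega
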